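-- pv_equiv track=rewrite | github.com/ThomasCrawford/AdventofCode | 2019/3.py | wire_dist_to_pt
-- ===== SOURCE A (Python) =====
-- def pt_on_seg(pt, seg):
--     xs = sorted([seg[0][0], seg[1][0]])
--     ys = sorted([seg[0][1], seg[1][1]])
--     if xs[0] <= pt[0] <= xs[1] and ys[0] <= pt[1] <= ys[1]:
--         return True
--     return False
--
-- def wire_dist_to_pt(wire, pt):
--     count = 0
--     for seg in wire:
--         if not pt_on_seg(pt, seg):
--             count += abs(seg[0][0] - seg[1][0]) + abs(seg[0][1] - seg[1][1])
--         else: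
--             count += abs(seg[0][0] - pt[0]) + abs(seg[0][1] - pt[1])
--             return count
-- ===== SOURCE B (Python) =====
-- def wire_dist_to_pt(wire, pt):
--     # two-phase: locate the first segment containing pt, then sum prefix lengths
--     def on_seg(seg):
--         (x0, y0), (x1, y1) = seg[0][:2], seg[1][:2]
--         return (min(x0, x1) <= pt[0] <= max(x0, x1)
--                 and min(y0, y1) <= pt[1] <= max(y0, y1))
--
--     i = next((k for k, seg in enumerate(wire) if on_seg(seg)), None)
--     if i is None:
--         return None
--     s = wire[i]
--     return (sum(abs(seg[0][0] - seg[1][0]) + abs(seg[0][1] - seg[1][1])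
--                 for seg in wire[:i])
--             + abs(s[0][0] - pt[0]) + abs(s[0][1] - pt[1]))
-- ===== Notes on version B (the rewrite author's own statement) =====
-- stated objective: alternative
-- what changed: B replaces A's single search loop with an inline running total by a two-phase computation: find the index of the first segment containing pt (min/max bounds test instead of sorting), then return sum() of the full Manhattan lengths of the prefix segments plus the partial distance along the matching segment.
import Mathlib
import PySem

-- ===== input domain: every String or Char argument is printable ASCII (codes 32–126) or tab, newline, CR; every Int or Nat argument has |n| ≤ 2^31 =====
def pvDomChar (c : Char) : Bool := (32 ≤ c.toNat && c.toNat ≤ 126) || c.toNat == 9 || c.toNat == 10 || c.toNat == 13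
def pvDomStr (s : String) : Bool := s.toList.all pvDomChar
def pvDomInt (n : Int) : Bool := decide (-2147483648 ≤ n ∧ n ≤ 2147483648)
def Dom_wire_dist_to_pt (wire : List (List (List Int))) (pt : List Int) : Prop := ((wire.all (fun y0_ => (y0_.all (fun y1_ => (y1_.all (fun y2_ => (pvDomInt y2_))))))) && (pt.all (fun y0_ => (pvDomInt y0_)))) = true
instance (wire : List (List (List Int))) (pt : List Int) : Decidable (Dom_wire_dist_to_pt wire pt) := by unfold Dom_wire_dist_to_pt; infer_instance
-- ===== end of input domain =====

-- B computes the same wire distance by a two-phase decomposition (find first matching segment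
-- via a min/max bounds test, then sum prefix lengths) instead of A's single loop with a running
-- total and a sort-based on-segment test; equivalence is about the return value on Pre_.


-- ===== PORT A =====
-- coordinate access; getD's default is only reached outside Pre_ (where Python raises IndexError)
def pvCoord (seg : List (List Int)) (i j : Nat) : Int := (seg.getD i []).getD j 0

def pt_on_seg (pt : List Int) (seg : List (List Int)) : Bool :=
  let xs := PySem.List.sorted [pvCoord seg 0 0, pvCoord seg 1 0] (fun x => x) false
  let ys := PySem.List.sorted [pvCoord seg 0 1, pvCoord seg 1 1] (fun x => x) false
  decide (xs.getD 0 0 ≤ pt.getD 0 0 ∧ pt.getD 0 0 ≤ xs.getD 1 0 ∧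
          ys.getD 0 0 ≤ pt.getD 1 0 ∧ pt.getD 1 0 ≤ ys.getD 1 0)

-- the for-loop of A, with its running total; the [] case is Python's fall-through (return None),
-- excluded by Pre_
def wireLoopA (pt : List Int) : List (List (List Int)) → Int → Int
  | [], _ => 0
  | seg :: rest, count =>
    if ¬ pt_on_seg pt seg then
      wireLoopA pt rest (count + (|pvCoord seg 0 0 - pvCoord seg 1 0| + |pvCoord seg 0 1 - pvCoord seg 1 1|))
    else
      count + (|pvCoord seg 0 0 - pt.getD 0 0| + |pvCoord seg 0 1 - pt.getD 1 0|)

def wire_dist_to_pt (wire : List (List (List Int))) (pt : List Int) : Int :=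
  wireLoopA pt wire 0

-- ===== PORT B =====
def onSegB (pt : List Int) (seg : List (List Int)) : Bool :=
  let x0 := (seg.getD 0 []).getD 0 0; let y0 := (seg.getD 0 []).getD 1 0
  let x1 := (seg.getD 1 []).getD 0 0; let y1 := (seg.getD 1 []).getD 1 0
  decide (min x0 x1 ≤ pt.getD 0 0 ∧ pt.getD 0 0 ≤ max x0 x1 ∧
          min y0 y1 ≤ pt.getD 1 0 ∧ pt.getD 1 0 ≤ max y0 y1)

def segLenB (seg : List (List Int)) : Int :=
  |(seg.getD 0 []).getD 0 0 - (seg.getD 1 []).getD 0 0| +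
  |(seg.getD 0 []).getD 1 0 - (seg.getD 1 []).getD 1 0|

def wire_dist_to_pt_alt (wire : List (List (List Int))) (pt : List Int) : Int :=
  match wire.findIdx? (fun seg => onSegB pt seg) with
  | none => 0
  | some i =>
    ((wire.take i).map segLenB).sum +
      (|(((wire.getD i []).getD 0 []).getD 0 0) - pt.getD 0 0| +
       |(((wire.getD i []).getD 0 []).getD 1 0) - pt.getD 1 0|)

-- ===== PRECONDITION & SPEC =====
-- shape/containment conditions used by Pre_ (independent of both ports)
def pvSegWF (seg : List (List Int)) : Prop :=
  2 ≤ seg.length ∧ 2 ≤ (seg.getD 0 []).length ∧ 2 ≤ (seg.getD 1 []).length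

def pvSegHas (seg : List (List Int)) (pt : List Int) : Prop :=
  min ((seg.getD 0 []).getD 0 0) ((seg.getD 1 []).getD 0 0) ≤ pt.getD 0 0 ∧
  pt.getD 0 0 ≤ max ((seg.getD 0 []).getD 0 0) ((seg.getD 1 []).getD 0 0) ∧
  min ((seg.getD 0 []).getD 1 0) ((seg.getD 1 []).getD 1 0) ≤ pt.getD 1 0 ∧
  pt.getD 1 0 ≤ max ((seg.getD 0 []).getD 1 0) ((seg.getD 1 []).getD 1 0)

-- Pre_ = exactly the inputs on which Python A returns an int: pt has two coordinates and some
-- segment contains pt with every segment up to it well-shaped (otherwise A raises IndexError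
-- before reaching it, or falls through returning None).
def Pre_wire_dist_to_pt (wire : List (List (List Int))) (pt : List Int) : Prop :=
  2 ≤ pt.length ∧
  ∃ i ∈ List.range wire.length,
    (∀ j ∈ List.range (i + 1), pvSegWF (wire.getD j [])) ∧ pvSegHas (wire.getD i []) pt

instance (wire : List (List (List Int))) (pt : List Int) : Decidable (Pre_wire_dist_to_pt wire pt) := by
  unfold Pre_wire_dist_to_pt pvSegWF pvSegHas; infer_instance

def pvWitness_wire_dist_to_pt : List (List (List Int)) × List Int :=
  ([[[0, 0], [3, 0]], [[3, 0], [3, 4]]], [3, 2])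

def Spec_wire_dist_to_pt (wire : List (List (List Int))) (pt : List Int) (out : Int) : Prop := out = wire_dist_to_pt_alt wire pt
instance (wire : List (List (List Int))) (pt : List Int) (out : Int) : Decidable (Spec_wire_dist_to_pt wire pt out) := by unfold Spec_wire_dist_to_pt; infer_instance

-- ===== CLAIM (what is proved, stated in full; the proofs are below) =====
def Claim_equal_wire_dist_to_pt : Prop := ∀ (wire : List (List (List Int))) (pt : List Int), Dom_wire_dist_to_pt wire pt → Pre_wire_dist_to_pt wire pt → Spec_wire_dist_to_pt wire pt (wire_dist_to_pt wire pt)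

-- ===== LEMMAS AND PROOFS =====

-- sorted of a two-element list is [min, max]
lemma sorted_pair (a b : Int) :
    PySem.List.sorted [a, b] (fun x => x) false = [min a b, max a b] := by
  apply PySem.List.sorted_id_eq_of_perm_of_pairwise
  · rcases le_total a b with h | h
    · simp [min_eq_left h, max_eq_right h]
    · rw [min_eq_right h, max_eq_left h]; exact List.Perm.swap a b []
  · simp [List.pairwise_cons]

-- A's sort-based test equals B's min/max test on every input
lemma pt_on_seg_eq_onSegB (pt : List Int) (seg : List (List Int)) :
    pt_on_seg pt seg = onSegB pt seg := by
  unfold pt_on_seg onSegB pvCoord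
  rw [sorted_pair, sorted_pair]
  simp [List.getD]

-- A's loop equals B's two-phase sum, for any accumulator
lemma loopA_eq (pt : List Int) :
    ∀ (wire : List (List (List Int))) (c : Int),
      wireLoopA pt wire c =
        match wire.findIdx? (fun seg => onSegB pt seg) with
        | none => 0
        | some i =>
          c + ((wire.take i).map segLenB).sum +
            (|(((wire.getD i []).getD 0 []).getD 0 0) - pt.getD 0 0| +
             |(((wire.getD i []).getD 0 []).getD 1 0) - pt.getD 1 0|) := by
  intro wire
  induction wire with
  | nil => intro c; simp [wireLoopA]
  | cons seg rest ih =>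
    intro c
    simp only [wireLoopA, pt_on_seg_eq_onSegB]
    by_cases h : onSegB pt seg
    · simp [List.findIdx?_cons, h, pvCoord]
    · rw [if_pos (by simp [h]), ih]
      simp only [List.findIdx?_cons, h]
      cases hr : rest.findIdx? (fun s => onSegB pt s) with
      | none => simp
      | some i =>
        simp [List.take_succ_cons, List.getD, segLenB, pvCoord]
        ring

-- ===== VERDICT (by name: the statement is the Claim_ definition above) =====
theorem wire_dist_to_pt_spec : Claim_equal_wire_dist_to_pt := by
  intro wire pt _ _
  unfold Spec_wire_dist_to_pt wire_dist_to_pt wire_dist_to_pt_alt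
  rw [loopA_eq]
  cases h : wire.findIdx? (fun seg => onSegB pt seg) <;> simp
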